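-- pv_equiv track=rewrite | github.com/mportesdev/adventofcode2019 | puzzle_6.py | direct_orbits
-- ===== SOURCE A (Python) =====
-- def direct_orbits(data_dict: dict, parent='COM') -> int:
--     if parent not in data_dict:
--         return 0
--
--     children = data_dict[parent]
--     result = len(children)
--     for child in children:
--         result += direct_orbits(data_dict, child)
--
--     return result
-- ===== SOURCE B (Python) =====
-- def direct_orbits(data_dict: dict, parent='COM') -> int:
--     result = 0
--     stack = [parent]
--     while stack:
--         node = stack.pop()
--         children = data_dict.get(node, [])
--         result += len(children)
--         stack.extend(children)
--     return result
-- ===== Notes on version B (the rewrite author's own statement) =====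
-- stated objective: alternative
-- what changed: Replaces the recursive descent with an iterative explicit-stack worklist that pops a node, adds len(children) to an accumulator and pushes the children, instead of summing recursive calls.
import Mathlib
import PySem

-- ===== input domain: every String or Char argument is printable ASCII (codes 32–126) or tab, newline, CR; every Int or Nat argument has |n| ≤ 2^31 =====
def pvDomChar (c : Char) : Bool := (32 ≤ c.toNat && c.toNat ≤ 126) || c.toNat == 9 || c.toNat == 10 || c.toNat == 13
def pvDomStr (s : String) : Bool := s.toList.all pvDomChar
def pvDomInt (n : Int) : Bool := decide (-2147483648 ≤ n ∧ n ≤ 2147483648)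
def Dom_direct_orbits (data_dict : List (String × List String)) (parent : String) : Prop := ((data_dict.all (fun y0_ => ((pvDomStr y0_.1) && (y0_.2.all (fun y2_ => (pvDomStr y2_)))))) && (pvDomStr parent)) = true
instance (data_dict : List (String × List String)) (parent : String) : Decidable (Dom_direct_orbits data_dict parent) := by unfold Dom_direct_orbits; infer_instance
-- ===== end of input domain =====

-- B replaces A's recursive descent by an iterative explicit-stack worklist traversal (alternative decomposition, same values).


-- ===== PORT A =====
-- A's recursion is not structural; the Nat fuel (the orbit depth is < length+1 under Pre_) only guards totality
-- and is never exhausted on inputs satisfying Pre_direct_orbits.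
def pvOrbitsFuel (data_dict : List (String × List String)) : Nat → String → Int
  | 0, _ => 0
  | fuel+1, parent =>
    if (PySem.Dict.mk data_dict).contains parent = false then 0
    else
      let children := (PySem.Dict.mk data_dict).getD parent []
      children.foldl (fun result child => result + pvOrbitsFuel data_dict fuel child)
        (PySem.List.len children)

def direct_orbits (data_dict : List (String × List String)) (parent : String) : Int :=
  pvOrbitsFuel data_dict (data_dict.length + 1) parent

-- ===== PORT B =====
-- pvVisits bounds the number of iterations of B's while-loop (a totality guard for the fuel, never
-- exhausted under Pre_direct_orbits); the loop body transliterates Source B.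
def pvVisits (data_dict : List (String × List String)) : Nat → String → Nat
  | 0, _ => 1
  | fuel+1, node => 1 + (((PySem.Dict.mk data_dict).getD node []).map (pvVisits data_dict fuel)).sum

def pvBLoop (data_dict : List (String × List String)) : Nat → List String → Int → Int
  | 0, _, result => result
  | fuel+1, stack, result =>
    match stack.getLast? with
    | none => result
    | some node =>
      let children := (PySem.Dict.mk data_dict).getD node []
      pvBLoop data_dict fuel (stack.dropLast ++ children) (result + PySem.List.len children)

def direct_orbits_alt (data_dict : List (String × List String)) (parent : String) : Int :=
  pvBLoop data_dict (pvVisits data_dict (data_dict.length + 1) parent) [parent] 0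

-- ===== PRECONDITION & SPEC =====
-- pvStep maps a set of bodies to the set of their direct orbiters (one edge-expansion of the orbit graph).
def pvStep (data_dict : List (String × List String)) (frontier : List String) : List String :=
  (frontier.flatMap (fun s => (PySem.Dict.mk data_dict).getD s [])).dedup

-- Pre_ excludes (i) inputs whose orbit graph has a directed chain of more than length+1 nodes starting at
-- parent — i.e. a cycle reachable from parent, where Python A never returns (RecursionError) — and
-- (ii) association lists with duplicate keys, which denote no single Python dict (first-match vs the
-- dict's last-wins overwrite is a representation artefact; A and B see the same dict and agree there).
def Pre_direct_orbits (data_dict : List (String × List String)) (parent : String) : Prop :=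
  (data_dict.map Prod.fst).Nodup ∧ (pvStep data_dict)^[data_dict.length + 1] [parent] = []
instance (data_dict : List (String × List String)) (parent : String) : Decidable (Pre_direct_orbits data_dict parent) := by unfold Pre_direct_orbits; infer_instance

def pvWitness_direct_orbits : (List (String × List String)) × String :=
  ([("COM", ["A", "B"]), ("A", ["C"])], "COM")

def Spec_direct_orbits (data_dict : List (String × List String)) (parent : String) (out : Int) : Prop := out = direct_orbits_alt data_dict parent
instance (data_dict : List (String × List String)) (parent : String) (out : Int) : Decidable (Spec_direct_orbits data_dict parent out) := by unfold Spec_direct_orbits; infer_instance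

-- ===== CLAIM (what is proved, stated in full; the proofs are below) =====
def Claim_equal_direct_orbits : Prop := ∀ (data_dict : List (String × List String)) (parent : String), Dom_direct_orbits data_dict parent → Pre_direct_orbits data_dict parent → Spec_direct_orbits data_dict parent (direct_orbits data_dict parent)

-- ===== LEMMAS AND PROOFS =====

-- pvDead d f s = true ⟺ every orbit chain out of s dies within f steps (proof-side reformulation of Pre_).
def pvDead (data_dict : List (String × List String)) : Nat → String → Bool
  | 0, _ => false
  | fuel+1, node => ((PySem.Dict.mk data_dict).getD node []).all (pvDead data_dict fuel)

theorem pvIterate_empty_iff_dead (d : List (String × List String)) :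
    ∀ (f : Nat) (xs : List String),
      (pvStep d)^[f] xs = [] ↔ ∀ s ∈ xs, pvDead d f s = true := by
  intro f
  induction f with
  | zero =>
    intro xs
    simp only [Function.iterate_zero, id_eq, pvDead]
    constructor
    · rintro rfl s hs; simp at hs
    · intro h; cases xs with
      | nil => rfl
      | cons x xs => exact absurd (h x (by simp)) (by simp)
  | succ f ih =>
    intro xs
    rw [Function.iterate_succ_apply, ih]
    constructor
    · intro h s hs
      simp only [pvDead, List.all_eq_true]
      intro c hc
      exact h c (by simp [pvStep, List.mem_dedup, List.mem_flatMap]; exact ⟨s, hs, hc⟩)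
    · intro h c hc
      simp only [pvStep, List.mem_dedup, List.mem_flatMap] at hc
      obtain ⟨s, hs, hcs⟩ := hc
      have := h s hs
      simp only [pvDead, List.all_eq_true] at this
      exact this c hcs

theorem pvDead_mono (d : List (String × List String)) :
    ∀ (f g : Nat) (s : String), f ≤ g → pvDead d f s = true → pvDead d g s = true := by
  intro f
  induction f with
  | zero => intro g s _ h; simp [pvDead] at h
  | succ f ih =>
    intro g s hfg h
    cases g with
    | zero => omega
    | succ g =>
      simp only [pvDead, List.all_eq_true] at h ⊢
      intro c hc
      exact ih g c (by omega) (h c hc)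

theorem pvOrbitsFuel_stable (d : List (String × List String)) :
    ∀ (f g : Nat) (s : String), f ≤ g → pvDead d f s = true →
      pvOrbitsFuel d f s = pvOrbitsFuel d g s := by
  intro f
  induction f with
  | zero => intro g s _ h; simp [pvDead] at h
  | succ f ih =>
    intro g s hfg h
    cases g with
    | zero => omega
    | succ g
    simp only [pvDead, List.all_eq_true] at h
    simp only [pvOrbitsFuel]
    split
    · rfl
    · exact PySem.List.foldl_congr_mem _ _ _ _ (fun acc c hc => by
        rw [ih g c (by omega) (h c hc)])

theorem pvVisits_stable (d : List (String × List String)) :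
    ∀ (f g : Nat) (s : String), f ≤ g → pvDead d f s = true →
      pvVisits d f s = pvVisits d g s := by
  intro f
  induction f with
  | zero => intro g s _ h; simp [pvDead] at h
  | succ f ih =>
    intro g s hfg h
    cases g with
    | zero => omega
    | succ g
    simp only [pvDead, List.all_eq_true] at h
    simp only [pvVisits]
    rw [List.map_congr_left (fun c hc => ih g c (by omega) (h c hc))]

theorem pvVisits_pos (d : List (String × List String)) (f : Nat) (s : String) :
    1 ≤ pvVisits d f s := by
  cases f <;> simp [pvVisits]

theorem pvBLoop_eq_sum (d : List (String × List String)) (D : Nat) :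
    ∀ (f : Nat) (st : List String) (r : Int),
      (∀ s ∈ st, pvDead d D s = true) →
      (st.map (pvVisits d D)).sum ≤ f →
      pvBLoop d f st r = r + (st.map (pvOrbitsFuel d D)).sum := by
  intro f
  induction f with
  | zero =>
    intro st r hdead hsum
    cases st with
    | nil => simp [pvBLoop]
    | cons x xs =>
      exfalso
      have := pvVisits_pos d D x
      simp [List.map_cons] at hsum
      omega
  | succ f ih =>
    intro st r hdead hsum
    by_cases hst : st = []
    · subst hst; simp [pvBLoop]
    · have hlast : st.getLast? = some (st.getLast hst) := List.getLast?_eq_some_getLast hst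
      have hsplit : st.dropLast ++ [st.getLast hst] = st := List.dropLast_concat_getLast hst
      set node := st.getLast hst with hnode
      have hdn : pvDead d D node = true := hdead node (by rw [← hsplit]; simp)
      obtain ⟨E, hE⟩ : ∃ E, D = E + 1 := by
        cases D with
        | zero => simp [pvDead] at hdn
        | succ E => exact ⟨E, rfl⟩
      subst hE
      have hch : ∀ c ∈ (PySem.Dict.mk d).getD node [], pvDead d E c = true := by
        simpa [pvDead, List.all_eq_true] using hdn
      simp only [pvBLoop, hlast]
      -- arithmetic facts about the visit counts
      have hv : pvVisits d (E + 1) node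
          = 1 + (((PySem.Dict.mk d).getD node []).map (pvVisits d (E + 1))).sum := by
        show 1 + (((PySem.Dict.mk d).getD node []).map (pvVisits d E)).sum = _
        rw [List.map_congr_left (fun c hc => pvVisits_stable d E (E + 1) c (by omega) (hch c hc))]
      have hsum' : (st.map (pvVisits d (E + 1))).sum
          = (st.dropLast.map (pvVisits d (E + 1))).sum + pvVisits d (E + 1) node := by
        conv_lhs => rw [← hsplit]
        simp
      rw [ih (st.dropLast ++ (PySem.Dict.mk d).getD node [])
          (r + PySem.List.len ((PySem.Dict.mk d).getD node []))
          (by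
            intro s hs
            rcases List.mem_append.mp hs with h1 | h2
            · exact hdead s (by rw [← hsplit]; exact List.mem_append.mpr (Or.inl h1))
            · exact pvDead_mono d E (E + 1) s (by omega) (hch s h2))
          (by
            have : ((st.dropLast ++ (PySem.Dict.mk d).getD node []).map (pvVisits d (E + 1))).sum
                = (st.dropLast.map (pvVisits d (E + 1))).sum
                  + (((PySem.Dict.mk d).getD node []).map (pvVisits d (E + 1))).sum := by
              simp
            rw [this]
            omega)]
      -- now the value accounting
      have hval : pvOrbitsFuel d (E + 1) node
          = PySem.List.len ((PySem.Dict.mk d).getD node [])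
            + (((PySem.Dict.mk d).getD node []).map (pvOrbitsFuel d (E + 1))).sum := by
        show (if (PySem.Dict.mk d).contains node = false then (0 : Int)
              else ((PySem.Dict.mk d).getD node []).foldl
                (fun result child => result + pvOrbitsFuel d E child)
                (PySem.List.len ((PySem.Dict.mk d).getD node []))) = _
        split_ifs with hcf
        · have h0 : (PySem.Dict.mk d).getD node [] = [] :=
            PySem.Dict.getD_of_not_contains _ _ hcf
          simp [h0, PySem.List.len]
        · rw [PySem.List.foldl_add,
            List.map_congr_left (fun c hc => pvOrbitsFuel_stable d E (E + 1) c (by omega) (hch c hc))]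
      conv_rhs => rw [← hsplit]
      simp only [List.map_append, List.sum_append, List.map_cons, List.map_nil, List.sum_cons,
        List.sum_nil]
      rw [hval]
      ring

theorem direct_orbits_spec : Claim_equal_direct_orbits := by
  intro d p _ hpre
  obtain ⟨_, hiter⟩ := hpre
  have hdead : pvDead d (d.length + 1) p = true :=
    (pvIterate_empty_iff_dead d (d.length + 1) [p]).mp hiter p (by simp)
  unfold Spec_direct_orbits direct_orbits direct_orbits_alt
  rw [pvBLoop_eq_sum d (d.length + 1) (pvVisits d (d.length + 1) p) [p] 0
      (by intro s hs; simp at hs; subst hs; exact hdead)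
      (by simp)]
  simp
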